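-- pv_equiv track=rewrite | github.com/manishaitrivedi-dot/pr-diff-demo1 | inline_comment.py | nearest_valid_position
-- ===== SOURCE A (Python) =====
-- from typing import Dict, List, Optional, Tuple
--
-- def nearest_valid_position(desired_line: int, pos_map: Dict[int, int]) -> Optional[Tuple[int, int]]:
--     """
--     Given a desired file line and a map {line -> position}, return (chosen_line, position)
--     choosing the closest available line at or before desired_line; if none, try after.
--     """
--     if not pos_map:
--         return None
--
--     if desired_line in pos_map:
--         return desired_line, pos_map[desired_line]
--
--     # Try searching downward first
--     lower = [ln for ln in pos_map.keys() if ln <= desired_line]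
--     if lower:
--         ln = max(lower)
--         return ln, pos_map[ln]
--
--     # Otherwise search upward
--     higher = [ln for ln in pos_map.keys() if ln >= desired_line]
--     if higher:
--         ln = min(higher)
--         return ln, pos_map[ln]
--
--     return None
-- ===== SOURCE B (Python) =====
-- from typing import Dict, Optional, Tuple
--
-- def nearest_valid_position(desired_line: int, pos_map: Dict[int, int]) -> Optional[Tuple[int, int]]:
--     """Single pass: keep the best candidate at-or-below and the best at-or-above."""
--     best_low = None   # greatest line <= desired_line (first such on ties)
--     best_high = None  # smallest line >= desired_line (first such on ties)
--     for ln, pos in pos_map.items():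
--         if ln <= desired_line and (best_low is None or best_low[0] < ln):
--             best_low = (ln, pos)
--         if ln >= desired_line and (best_high is None or ln < best_high[0]):
--             best_high = (ln, pos)
--     return best_low if best_low is not None else best_high
-- ===== Notes on version B (the rewrite author's own statement) =====
-- stated objective: alternative
-- what changed: Replaces A's multi-pass pipeline (membership test, two filter comprehensions, max/min over them, dict lookups) with a single pass over the items maintaining two running candidates (greatest line <= desired, smallest line >= desired), returning the low candidate if present else the high one.
import Mathlib
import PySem

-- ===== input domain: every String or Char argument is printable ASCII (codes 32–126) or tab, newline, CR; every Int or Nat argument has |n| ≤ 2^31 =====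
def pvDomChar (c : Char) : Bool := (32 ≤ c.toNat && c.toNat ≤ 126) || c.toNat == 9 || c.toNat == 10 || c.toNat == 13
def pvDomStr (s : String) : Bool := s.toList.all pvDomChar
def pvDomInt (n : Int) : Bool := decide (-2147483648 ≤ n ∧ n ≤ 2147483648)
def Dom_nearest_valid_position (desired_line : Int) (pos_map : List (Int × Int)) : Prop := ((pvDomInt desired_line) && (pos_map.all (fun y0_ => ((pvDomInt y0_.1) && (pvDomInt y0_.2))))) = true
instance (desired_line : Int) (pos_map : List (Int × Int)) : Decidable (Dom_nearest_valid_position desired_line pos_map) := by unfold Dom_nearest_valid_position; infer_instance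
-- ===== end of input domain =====

-- B replaces A's four passes (membership test, two filter comprehensions, max/min + lookups)
-- by one pass over the items keeping two running candidates; same result, alternative decomposition.

-- ===== PORT A =====
def nearest_valid_position (desired_line : Int) (pos_map : List (Int × Int)) : Option (Int × Int) :=
  if pos_map = [] then none
  else if (pos_map.map Prod.fst).contains desired_line then
    match pos_map.lookup desired_line with
    | some v => some (desired_line, v)
    | none => none  -- unreachable: key is present
  else
    let lower := (pos_map.map Prod.fst).filter (fun ln => ln ≤ desired_line)
    if lower ≠ [] then
      match PySem.List.max? lower (fun x => x) with
      | some ln =>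
        (match pos_map.lookup ln with
         | some v => some (ln, v)
         | none => none)  -- unreachable
      | none => none  -- unreachable: lower ≠ []
    else
      let higher := (pos_map.map Prod.fst).filter (fun ln => desired_line ≤ ln)
      if higher ≠ [] then
        match PySem.List.min? higher (fun x => x) with
        | some ln =>
          (match pos_map.lookup ln with
           | some v => some (ln, v)
           | none => none)  -- unreachable
        | none => none  -- unreachable
      else none

-- ===== PORT B =====
-- one loop-body step of Source B: update best_low / best_high with the current item
def nvpBumpLo (d : Int) (lo : Option (Int × Int)) (e : Int × Int) : Option (Int × Int) :=
  if e.1 ≤ d then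
    match lo with
    | none => some e
    | some b => if b.1 < e.1 then some e else some b
  else lo

def nvpBumpHi (d : Int) (hi : Option (Int × Int)) (e : Int × Int) : Option (Int × Int) :=
  if d ≤ e.1 then
    match hi with
    | none => some e
    | some b => if e.1 < b.1 then some e else some b
  else hi

def nearest_valid_position_alt (desired_line : Int) (pos_map : List (Int × Int)) : Option (Int × Int) :=
  let r := pos_map.foldl
    (fun acc e => (nvpBumpLo desired_line acc.1 e, nvpBumpHi desired_line acc.2 e))
    (none, none)
  match r.1 with
  | some b => some b
  | none => r.2

-- ===== PRECONDITION & SPEC =====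
def Spec_nearest_valid_position (desired_line : Int) (pos_map : List (Int × Int)) (out : Option (Int × Int)) : Prop := out = nearest_valid_position_alt desired_line pos_map
instance (desired_line : Int) (pos_map : List (Int × Int)) (out : Option (Int × Int)) : Decidable (Spec_nearest_valid_position desired_line pos_map out) := by unfold Spec_nearest_valid_position; infer_instance

-- ===== CLAIM (what is proved, stated in full; the proofs are below) =====
def Claim_equal_nearest_valid_position : Prop := ∀ (desired_line : Int) (pos_map : List (Int × Int)), Dom_nearest_valid_position desired_line pos_map → Spec_nearest_valid_position desired_line pos_map (nearest_valid_position desired_line pos_map)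

-- ===== LEMMAS AND PROOFS =====

-- proof-only helpers: the two ways the loop body can act once the guard holds
def nvpPickMax (b e : Int × Int) : Int × Int := if b.1 < e.1 then e else b
def nvpPickMin (b e : Int × Int) : Int × Int := if e.1 < b.1 then e else b
def nvpStepMax (acc : Option (Int × Int)) (e : Int × Int) : Option (Int × Int) :=
  match acc with | none => some e | some b => some (nvpPickMax b e)
def nvpStepMin (acc : Option (Int × Int)) (e : Int × Int) : Option (Int × Int) :=
  match acc with | none => some e | some b => some (nvpPickMin b e)

theorem nvp_foldl_pair (d : Int) (l : List (Int × Int)) (lo hi : Option (Int × Int)) :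
    l.foldl (fun acc e => (nvpBumpLo d acc.1 e, nvpBumpHi d acc.2 e)) (lo, hi)
      = (l.foldl (nvpBumpLo d) lo, l.foldl (nvpBumpHi d) hi) := by
  induction l generalizing lo hi with
  | nil => rfl
  | cons e t ih => simp [List.foldl_cons, ih]

theorem nvp_bumpLo_eq (d : Int) (l : List (Int × Int)) (lo : Option (Int × Int)) :
    l.foldl (nvpBumpLo d) lo = (l.filter (fun e => e.1 ≤ d)).foldl nvpStepMax lo := by
  induction l generalizing lo with
  | nil => rfl
  | cons e t ih =>
    by_cases h : e.1 ≤ d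
    · simp only [List.foldl_cons, List.filter_cons, h, decide_true, ite_true, ih]
      congr 1
      cases lo with
      | none => simp [nvpBumpLo, nvpStepMax, h]
      | some b => simp [nvpBumpLo, nvpStepMax, nvpPickMax, h, apply_ite some]
    · simp only [List.foldl_cons, List.filter_cons, h, decide_false, ih]
      congr 1
      simp [nvpBumpLo, h]

theorem nvp_bumpHi_eq (d : Int) (l : List (Int × Int)) (hi : Option (Int × Int)) :
    l.foldl (nvpBumpHi d) hi = (l.filter (fun e => d ≤ e.1)).foldl nvpStepMin hi := by
  induction l generalizing hi with
  | nil => rfl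
  | cons e t ih =>
    by_cases h : d ≤ e.1
    · simp only [List.foldl_cons, List.filter_cons, h, decide_true, ite_true, ih]
      congr 1
      cases hi with
      | none => simp [nvpBumpHi, nvpStepMin, h]
      | some b => simp [nvpBumpHi, nvpStepMin, nvpPickMin, h, apply_ite some]
    · simp only [List.foldl_cons, List.filter_cons, h, decide_false, ih]
      congr 1
      simp [nvpBumpHi, h]

theorem nvp_stepMax_some (t : List (Int × Int)) (b : Int × Int) :
    t.foldl nvpStepMax (some b) = some (t.foldl nvpPickMax b) := by
  induction t generalizing b with
  | nil => rfl
  | cons e t ih => simp [List.foldl_cons, nvpStepMax, ih]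

theorem nvp_stepMin_some (t : List (Int × Int)) (b : Int × Int) :
    t.foldl nvpStepMin (some b) = some (t.foldl nvpPickMin b) := by
  induction t generalizing b with
  | nil => rfl
  | cons e t ih => simp [List.foldl_cons, nvpStepMin, ih]

theorem nvp_keyMax (t : List (Int × Int)) (b : Int × Int) :
    (t.foldl nvpPickMax b).1 = (t.map Prod.fst).foldl max b.1 := by
  induction t generalizing b with
  | nil => rfl
  | cons e t ih =>
    simp only [List.foldl_cons, List.map_cons, ih]
    congr 1
    unfold nvpPickMax; split_ifs <;> omega

theorem nvp_keyMin (t : List (Int × Int)) (b : Int × Int) :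
    (t.foldl nvpPickMin b).1 = (t.map Prod.fst).foldl min b.1 := by
  induction t generalizing b with
  | nil => rfl
  | cons e t ih =>
    simp only [List.foldl_cons, List.map_cons, ih]
    congr 1
    unfold nvpPickMin; split_ifs <;> omega

theorem nvp_monoMax (t : List (Int × Int)) (b : Int × Int) :
    t.foldl nvpPickMax b = b ∨ b.1 < (t.foldl nvpPickMax b).1 := by
  induction t generalizing b with
  | nil => left; rfl
  | cons e t ih =>
    simp only [List.foldl_cons]
    by_cases h : b.1 < e.1
    · right
      have := ih (nvpPickMax b e)
      have hpk : nvpPickMax b e = e := by simp [nvpPickMax, h]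
      rcases this with h2 | h2
      · rw [h2, hpk]; exact h
      · rw [hpk] at h2 ⊢; omega
    · have hpk : nvpPickMax b e = b := by simp [nvpPickMax, h]
      rw [hpk]; exact ih b

theorem nvp_monoMin (t : List (Int × Int)) (b : Int × Int) :
    t.foldl nvpPickMin b = b ∨ (t.foldl nvpPickMin b).1 < b.1 := by
  induction t generalizing b with
  | nil => left; rfl
  | cons e t ih =>
    simp only [List.foldl_cons]
    by_cases h : e.1 < b.1
    · right
      have := ih (nvpPickMin b e)
      have hpk : nvpPickMin b e = e := by simp [nvpPickMin, h]
      rcases this with h2 | h2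
      · rw [h2, hpk]; exact h
      · rw [hpk] at h2 ⊢; omega
    · have hpk : nvpPickMin b e = b := by simp [nvpPickMin, h]
      rw [hpk]; exact ih b

theorem nvp_lookupMax (t : List (Int × Int)) (b : Int × Int) :
    (b :: t).lookup (t.foldl nvpPickMax b).1 = some (t.foldl nvpPickMax b).2 := by
  induction t generalizing b with
  | nil => simp [List.lookup]
  | cons e t ih =>
    simp only [List.foldl_cons]
    by_cases h : b.1 < e.1
    · have hpk : nvpPickMax b e = e := by simp [nvpPickMax, h]
      rw [hpk]
      have hle : e.1 ≤ (t.foldl nvpPickMax e).1 := by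
        rcases nvp_monoMax t e with h2 | h2
        · rw [h2]
        · omega
      have hne : ((t.foldl nvpPickMax e).1 == b.1) = false := by
        simp only [beq_eq_false_iff_ne, ne_eq]; omega
      rw [List.lookup]
      simp only [hne]
      exact ih e
    · have hpk : nvpPickMax b e = b := by simp [nvpPickMax, h]
      rw [hpk]
      rcases nvp_monoMax t b with h2 | h2
      · rw [h2]; simp [List.lookup]
      · have hne1 : ((t.foldl nvpPickMax b).1 == b.1) = false := by
          simp only [beq_eq_false_iff_ne, ne_eq]; omega
        have hne2 : ((t.foldl nvpPickMax b).1 == e.1) = false := by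
          simp only [beq_eq_false_iff_ne, ne_eq]; omega
        rw [List.lookup]
        simp only [hne1]
        rw [List.lookup]
        simp only [hne2]
        have := ih b
        rw [List.lookup] at this
        simp only [hne1] at this
        exact this

theorem nvp_lookupMin (t : List (Int × Int)) (b : Int × Int) :
    (b :: t).lookup (t.foldl nvpPickMin b).1 = some (t.foldl nvpPickMin b).2 := by
  induction t generalizing b with
  | nil => simp [List.lookup]
  | cons e t ih =>
    simp only [List.foldl_cons]
    by_cases h : e.1 < b.1
    · have hpk : nvpPickMin b e = e := by simp [nvpPickMin, h]
      rw [hpk]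
      have hle : (t.foldl nvpPickMin e).1 ≤ e.1 := by
        rcases nvp_monoMin t e with h2 | h2
        · rw [h2]
        · omega
      have hne : ((t.foldl nvpPickMin e).1 == b.1) = false := by
        simp only [beq_eq_false_iff_ne, ne_eq]; omega
      rw [List.lookup]
      simp only [hne]
      exact ih e
    · have hpk : nvpPickMin b e = b := by simp [nvpPickMin, h]
      rw [hpk]
      rcases nvp_monoMin t b with h2 | h2
      · rw [h2]; simp [List.lookup]
      · have hne1 : ((t.foldl nvpPickMin b).1 == b.1) = false := by
          simp only [beq_eq_false_iff_ne, ne_eq]; omega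
        have hne2 : ((t.foldl nvpPickMin b).1 == e.1) = false := by
          simp only [beq_eq_false_iff_ne, ne_eq]; omega
        rw [List.lookup]
        simp only [hne1]
        rw [List.lookup]
        simp only [hne2]
        have := ih b
        rw [List.lookup] at this
        simp only [hne1] at this
        exact this

-- looking a key ≤ d up in the ≤-filtered list is looking it up in the whole list
theorem nvp_lookup_filter_le (d m : Int) (l : List (Int × Int)) (hm : m ≤ d) :
    (l.filter (fun e => e.1 ≤ d)).lookup m = l.lookup m := by
  induction l with
  | nil => rfl
  | cons e t ih =>
    by_cases h : e.1 ≤ d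
    · simp only [List.filter_cons, h, decide_true, ite_true, List.lookup, ih]
    · have hne : (m == e.1) = false := by
        simp only [beq_eq_false_iff_ne, ne_eq]; omega
      simp only [List.filter_cons, h, decide_false]
      rw [if_neg (by simp), List.lookup]
      simp only [hne, ih]

theorem nvp_lookup_filter_ge (d m : Int) (l : List (Int × Int)) (hm : d ≤ m) :
    (l.filter (fun e => d ≤ e.1)).lookup m = l.lookup m := by
  induction l with
  | nil => rfl
  | cons e t ih =>
    by_cases h : d ≤ e.1
    · simp only [List.filter_cons, h, decide_true, ite_true, List.lookup, ih]
    · have hne : (m == e.1) = false := by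
        simp only [beq_eq_false_iff_ne, ne_eq]; omega
      simp only [List.filter_cons, h, decide_false]
      rw [if_neg (by simp), List.lookup]
      simp only [hne, ih]

-- keys of the filtered pair list = filtered keys
theorem nvp_filter_map_le (d : Int) (l : List (Int × Int)) :
    (l.map Prod.fst).filter (fun ln => ln ≤ d) = (l.filter (fun e => e.1 ≤ d)).map Prod.fst := by
  induction l with
  | nil => rfl
  | cons e t ih =>
    by_cases h : e.1 ≤ d <;>
      simp [h, ih]

theorem nvp_filter_map_ge (d : Int) (l : List (Int × Int)) :
    (l.map Prod.fst).filter (fun ln => d ≤ ln) = (l.filter (fun e => d ≤ e.1)).map Prod.fst := by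
  induction l with
  | nil => rfl
  | cons e t ih =>
    by_cases h : d ≤ e.1 <;>
      simp [h, ih]


theorem nvp_memMax (t : List (Int × Int)) (b : Int × Int) :
    t.foldl nvpPickMax b ∈ b :: t := by
  induction t generalizing b with
  | nil => simp
  | cons e t ih =>
    simp only [List.foldl_cons]
    have h := ih (nvpPickMax b e)
    rcases List.mem_cons.mp h with h2 | h2
    · rw [h2]
      unfold nvpPickMax; split_ifs <;> simp
    · simp [h2]

theorem nvp_memMin (t : List (Int × Int)) (b : Int × Int) :
    t.foldl nvpPickMin b ∈ b :: t := by
  induction t generalizing b with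
  | nil => simp
  | cons e t ih =>
    simp only [List.foldl_cons]
    have h := ih (nvpPickMin b e)
    rcases List.mem_cons.mp h with h2 | h2
    · rw [h2]
      unfold nvpPickMin; split_ifs <;> simp
    · simp [h2]

-- A's result when some key lies at or below desired_line
theorem nvp_A_low (d : Int) (l : List (Int × Int)) (b : Int × Int) (t : List (Int × Int))
    (hL : l.filter (fun e => e.1 ≤ d) = b :: t) :
    nearest_valid_position d l = some (t.foldl nvpPickMax b) := by
  have hlne : l ≠ [] := by
    intro h; rw [h] at hL; simp at hL
  set P := t.foldl nvpPickMax b with hP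
  have hPmem : P ∈ l.filter (fun e => e.1 ≤ d) := by
    rw [hL]; exact nvp_memMax t b
  have hPle : P.1 ≤ d := by
    have := List.of_mem_filter hPmem
    simpa using this
  have hlower : (l.map Prod.fst).filter (fun ln => ln ≤ d) = b.1 :: t.map Prod.fst := by
    rw [nvp_filter_map_le, hL]; rfl
  have hmax : PySem.List.max? ((l.map Prod.fst).filter (fun ln => ln ≤ d)) (fun x => x)
      = some P.1 := by
    rw [hlower, PySem.List.max?_id_cons, hP, nvp_keyMax]
  have hlook : l.lookup P.1 = some P.2 := by
    rw [← nvp_lookup_filter_le d P.1 l hPle, hL, hP]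
    exact nvp_lookupMax t b
  unfold nearest_valid_position
  rw [if_neg hlne]
  by_cases hc : (l.map Prod.fst).contains d = true
  · -- desired_line is itself a key: it is then the greatest key ≤ d, i.e. P.1
    have hd : d = P.1 := by
      have hdmem : d ∈ (l.map Prod.fst).filter (fun ln => ln ≤ d) := by
        have : d ∈ l.map Prod.fst := by simpa using hc
        exact List.mem_filter.mpr ⟨this, by simp⟩
      have := PySem.List.max?_isMax hmax d hdmem
      omega
    rw [if_pos hc, hd, hlook]
  · rw [if_neg hc]
    simp only [hlower]
    rw [if_pos (by simp)]
    have hmax' : (PySem.List.max? (b.1 :: t.map Prod.fst) (fun x => x)) = some P.1 := by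
      rw [← hlower]; exact hmax
    rw [hmax']
    simp [hlook]

-- A's result when every key lies strictly above desired_line
theorem nvp_A_high (d : Int) (x : Int × Int) (l' : List (Int × Int))
    (hL : (x :: l').filter (fun e => e.1 ≤ d) = []) :
    nearest_valid_position d (x :: l') = some (l'.foldl nvpPickMin x) := by
  have hall : ∀ e ∈ (x :: l'), ¬ (e.1 ≤ d) := by
    intro e he
    have := List.filter_eq_nil_iff.mp hL e he
    simpa using this
  have hH : (x :: l').filter (fun e => d ≤ e.1) = x :: l' := by
    apply List.filter_eq_self.mpr
    intro e he
    have := hall e he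
    simp only [decide_eq_true_eq]
    omega
  set P := l'.foldl nvpPickMin x with hP
  have hPmem : P ∈ x :: l' := nvp_memMin l' x
  have hPge : d ≤ P.1 := by
    have := hall P hPmem
    omega
  have hhigher : ((x :: l').map Prod.fst).filter (fun ln => d ≤ ln)
      = x.1 :: l'.map Prod.fst := by
    rw [nvp_filter_map_ge, hH]; rfl
  have hmin : PySem.List.min? (((x :: l').map Prod.fst).filter (fun ln => d ≤ ln)) (fun y => y)
      = some P.1 := by
    rw [hhigher, PySem.List.min?_id_cons, hP, nvp_keyMin]
  have hlook : (x :: l').lookup P.1 = some P.2 := by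
    rw [← nvp_lookup_filter_ge d P.1 (x :: l') hPge, hH, hP]
    exact nvp_lookupMin l' x
  have hc : ((x :: l').map Prod.fst).contains d = false := by
    have hnm : d ∉ (x :: l').map Prod.fst := by
      intro hmem
      rcases List.mem_map.mp hmem with ⟨e, he, hed⟩
      exact hall e he (by omega)
    simpa using hnm
  have hlower : ((x :: l').map Prod.fst).filter (fun ln => ln ≤ d) = [] := by
    rw [nvp_filter_map_le, hL]; rfl
  unfold nearest_valid_position
  rw [if_neg (by simp : ¬ (x :: l' : List (Int × Int)) = []), hc]
  simp only [Bool.false_eq_true, if_false, hlower]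
  rw [if_neg (by simp)]
  rw [if_pos (by rw [hhigher]; simp), hmin]
  simp [hlook]

-- B's result in the same two situations
theorem nvp_B_low (d : Int) (l : List (Int × Int)) (b : Int × Int) (t : List (Int × Int))
    (hL : l.filter (fun e => e.1 ≤ d) = b :: t) :
    nearest_valid_position_alt d l = some (t.foldl nvpPickMax b) := by
  unfold nearest_valid_position_alt
  rw [nvp_foldl_pair, nvp_bumpLo_eq, hL]
  simp only [List.foldl_cons, nvpStepMax, nvp_stepMax_some]

theorem nvp_B_high (d : Int) (x : Int × Int) (l' : List (Int × Int))
    (hL : (x :: l').filter (fun e => e.1 ≤ d) = []) :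
    nearest_valid_position_alt d (x :: l') = some (l'.foldl nvpPickMin x) := by
  have hH : (x :: l').filter (fun e => d ≤ e.1) = x :: l' := by
    apply List.filter_eq_self.mpr
    intro e he
    have := List.filter_eq_nil_iff.mp hL e he
    simp only [decide_eq_true_eq]
    simp only [decide_eq_true_eq] at this
    omega
  unfold nearest_valid_position_alt
  rw [nvp_foldl_pair, nvp_bumpLo_eq, nvp_bumpHi_eq, hL, hH]
  simp only [List.foldl_cons, List.foldl_nil, nvpStepMin, nvp_stepMin_some]

-- ===== VERDICT (by name: the statement is the Claim_ definition above) =====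
theorem nearest_valid_position_spec : Claim_equal_nearest_valid_position := by
  intro d l _
  unfold Spec_nearest_valid_position
  cases hL : l.filter (fun e => e.1 ≤ d) with
  | cons b t => rw [nvp_A_low d l b t hL, nvp_B_low d l b t hL]
  | nil =>
    cases l with
    | nil => rfl
    | cons x l' => rw [nvp_A_high d x l' hL, nvp_B_high d x l' hL]
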